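-- pv_equiv track=rewrite | github.com/ckswls56/BaejoonHub | 프로그래머스/2/250136. ［PCCP 기출문제］ 2번 ／ 석유 시추/［PCCP 기출문제］ 2번 ／ 석유 시추.py | solution
-- ===== SOURCE A (Python) =====
-- from collections import deque
--
-- def solution(land):
--     answer = 0
--
--     direction = [(-1, 0), (1, 0), (0, -1), (0, 1)]
--
--     # visited 배열 초기화 최적화
--     visited = [[False] * len(land[0]) for _ in range(len(land))]
--
--     res = [0] * (len(land[0])+1)
--
--     # 석유 그룹 탐사
--     for i in range(len(land)):
--         for j in range(len(land[0])):
--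
--             if land[i][j] and not visited[i][j]:
--
--                 cnt = 0
--                 q = deque([(i, j)])
--                 visited[i][j] = True
--                 min_x,max_x = j,j
--
--                 while q:
--
--                     y, x = q.popleft()
--                     min_x,max_x = min(min_x,x),max(max_x,x)
--                     cnt+=1
--
--                     for dy, dx in direction:
--
--                         ny, nx = y + dy, x + dx
--
--                         if 0 <= ny < len(land) and 0 <= nx < len(land[0]) and not visited[ny][nx] and land[ny][nx]:
--                             q.append((ny, nx))
--                             visited[ny][nx] = True
--
--
--                 for k in range(min_x,max_x+1):
--                     res[k] += cnt
--
--     return max(res)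
-- ===== SOURCE B (Python) =====
-- def solution(land):
--     rows, cols = len(land), len(land[0])
--     comps = []
--     done = set()
--     for i in range(rows):
--         for j in range(cols):
--             if land[i][j] and (i, j) not in done:
--                 comp = {(i, j)}
--                 while True:
--                     grown = comp | {(y + dy, x + dx)
--                                     for (y, x) in comp
--                                     for dy, dx in ((-1, 0), (1, 0), (0, -1), (0, 1))
--                                     if 0 <= y + dy < rows and 0 <= x + dx < cols
--                                     and land[y + dy][x + dx]}
--                     if len(grown) == len(comp):
--                         break
--                     comp = grown
--                 done |= comp
--                 comps.append((len(comp),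
--                               min(x for _, x in comp),
--                               max(x for _, x in comp)))
--     best = 0
--     for k in range(cols):
--         best = max(best, sum(c for c, lo, hi in comps if lo <= k <= hi))
--     return best
-- ===== Notes on version B (the rewrite author's own statement) =====
-- stated objective: alternative
-- what changed: Replaces the per-seed BFS deque with visited matrix and an in-place res array by a fixpoint set-saturation per component, a summary list (size, min column, max column) per component, and a running max of per-column sums; Pre_ excludes the empty grid and ragged grids with a row shorter than the first, on which A raises IndexError.
import Mathlib
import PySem

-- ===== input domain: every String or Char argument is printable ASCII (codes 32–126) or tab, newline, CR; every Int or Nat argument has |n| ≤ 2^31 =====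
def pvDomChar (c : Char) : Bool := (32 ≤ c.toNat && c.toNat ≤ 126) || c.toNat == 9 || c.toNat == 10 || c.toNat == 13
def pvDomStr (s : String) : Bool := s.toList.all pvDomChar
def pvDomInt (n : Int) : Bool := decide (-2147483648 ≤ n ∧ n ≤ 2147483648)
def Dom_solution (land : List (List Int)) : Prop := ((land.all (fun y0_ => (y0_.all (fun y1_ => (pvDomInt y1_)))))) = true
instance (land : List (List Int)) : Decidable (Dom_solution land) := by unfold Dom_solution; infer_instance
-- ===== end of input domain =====

-- B replaces A's per-seed BFS (deque + visited matrix + in-place res array) by per-seed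
-- fixpoint set-saturation, a per-component summary list and a running max of per-column sums.
-- Objective: alternative (not faster).

-- ===== PORT A =====
-- land[i][j] as an Int (0 default only outside Pre_, where Python raises)
def pvCell (land : List (List Int)) (i j : Int) : Int :=
  (PySem.List.pyGet? ((PySem.List.pyGet? land i).getD []) j).getD 0

def pvVGet (v : List (List Bool)) (i j : Int) : Bool :=
  (PySem.List.pyGet? ((PySem.List.pyGet? v i).getD []) j).getD false

def pvVSet (v : List (List Bool)) (i j : Int) : List (List Bool) :=
  PySem.List.pySetD v i (PySem.List.pySetD (PySem.List.pyGetD v i []) j true)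

def pvDirs : List (Int × Int) := [(-1,0),(1,0),(0,-1),(0,1)]

-- body of A's 'for dy, dx in direction' loop
def pvStepA (land : List (List Int)) (rows cols : Int) (y x : Int)
    (st : List (Int × Int) × List (List Bool)) (d : Int × Int) :
    List (Int × Int) × List (List Bool) :=
  let ny := y + d.1
  let nx := x + d.2
  if 0 ≤ ny ∧ ny < rows ∧ 0 ≤ nx ∧ nx < cols ∧ pvVGet st.2 ny nx = false ∧ pvCell land ny nx ≠ 0
  then (st.1 ++ [(ny, nx)], pvVSet st.2 ny nx)
  else st

-- A's 'while q' BFS loop; fuel only totalizes the loop (proved sufficient below)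
def pvBfs (land : List (List Int)) (rows cols : Int) :
    Nat → List (Int × Int) → List (List Bool) → Int → Int → Int →
    List (List Bool) × Int × Int × Int
  | _, [], v, cnt, mn, mx => (v, cnt, mn, mx)
  | 0, _ :: _, v, cnt, mn, mx => (v, cnt, mn, mx)
  | fuel + 1, (y, x) :: q, v, cnt, mn, mx =>
    let st := pvDirs.foldl (pvStepA land rows cols y x) (q, v)
    pvBfs land rows cols fuel st.1 st.2 (cnt + 1) (min mn x) (max mx x)

def solution (land : List (List Int)) : Int :=
  let rows : Int := PySem.List.len land
  let cols : Int := PySem.List.len (PySem.List.pyGetD land 0 [])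
  let fuel : Nat := 2 * land.length * (PySem.List.pyGetD land 0 []).length + 2
  let visited0 : List (List Bool) :=
    List.replicate land.length (List.replicate (PySem.List.pyGetD land 0 []).length false)
  let res0 : List Int := List.replicate ((PySem.List.pyGetD land 0 []).length + 1) 0
  let fin := (PySem.List.pyRange 0 rows 1).foldl (fun st i =>
    (PySem.List.pyRange 0 cols 1).foldl (fun (st : List (List Bool) × List Int) j =>
      if pvCell land i j ≠ 0 ∧ pvVGet st.1 i j = false then
        let v1 := pvVSet st.1 i j
        let r := pvBfs land rows cols fuel [(i, j)] v1 0 j j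
        let res := (PySem.List.pyRange r.2.2.1 (r.2.2.2 + 1) 1).foldl
          (fun res k => PySem.List.pySetD res k (PySem.List.pyGetD res k 0 + r.2.1)) st.2
        (r.1, res)
      else st) st) (visited0, res0)
  (PySem.List.max? fin.2 (fun z => z)).getD 0

-- ===== PORT B =====
def pvNbrs (land : List (List Int)) (rows cols : Int) (p : Int × Int) : List (Int × Int) :=
  pvDirs.filterMap (fun d =>
    let ny := p.1 + d.1
    let nx := p.2 + d.2
    if 0 ≤ ny ∧ ny < rows ∧ 0 ≤ nx ∧ nx < cols ∧ pvCell land ny nx ≠ 0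
    then some (ny, nx) else none)

-- 'grown = comp | {in-grid truthy neighbours of comp}'
def pvGrow (land : List (List Int)) (rows cols : Int)
    (comp : PySem.Set (Int × Int)) : PySem.Set (Int × Int) :=
  PySem.Set.union comp (PySem.Set.ofList (comp.flatMap (pvNbrs land rows cols)))

-- B's 'while True' saturation loop; fuel only totalizes it (proved sufficient below)
def pvSaturate (land : List (List Int)) (rows cols : Int) :
    Nat → PySem.Set (Int × Int) → PySem.Set (Int × Int)
  | 0, comp => comp
  | fuel + 1, comp =>
    let grown := pvGrow land rows cols comp
    if PySem.Set.len grown = PySem.Set.len comp then comp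
    else pvSaturate land rows cols fuel grown

def solution_alt (land : List (List Int)) : Int :=
  let rows : Int := PySem.List.len land
  let cols : Int := PySem.List.len (PySem.List.pyGetD land 0 [])
  let fuel : Nat := land.length * (PySem.List.pyGetD land 0 []).length + 1
  let fin := (PySem.List.pyRange 0 rows 1).foldl (fun st i =>
    (PySem.List.pyRange 0 cols 1).foldl
      (fun (st : PySem.Set (Int × Int) × List (Int × Int × Int)) j =>
      if pvCell land i j ≠ 0 ∧ ¬ PySem.Set.contains st.1 (i, j) = true then
        let comp := pvSaturate land rows cols fuel (PySem.Set.ofList [(i, j)])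
        (PySem.Set.union st.1 comp,
         st.2 ++ [((PySem.Set.len comp : Int),
                   (PySem.List.min? (comp.map (fun p => p.2)) (fun z => z)).getD 0,
                   (PySem.List.max? (comp.map (fun p => p.2)) (fun z => z)).getD 0)])
      else st) st) ((PySem.Set.empty : PySem.Set (Int × Int)), ([] : List (Int × Int × Int)))
  (PySem.List.pyRange 0 cols 1).foldl (fun best k =>
    max best ((fin.2.filter (fun t => decide (t.2.1 ≤ k ∧ k ≤ t.2.2))).map (fun t => t.1)).sum) 0

-- ===== PRECONDITION & SPEC =====
-- Pre_ excludes exactly the inputs where Python A raises IndexError: the empty grid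
-- (len(land[0])) and grids with some row shorter than the first row.
def Pre_solution (land : List (List Int)) : Prop :=
  land ≠ [] ∧ ∀ row ∈ land, (land.headI).length ≤ row.length
instance (land : List (List Int)) : Decidable (Pre_solution land) := by
  unfold Pre_solution; infer_instance

def pvWitness_solution : List (List Int) := [[1, 0], [0, 1]]

def Spec_solution (land : List (List Int)) (out : Int) : Prop := out = solution_alt land
instance (land : List (List Int)) (out : Int) : Decidable (Spec_solution land out) := by
  unfold Spec_solution; infer_instance

-- ===== CLAIM (what is proved, stated in full; the proofs are below) =====
def Claim_equal_solution : Prop := ∀ (land : List (List Int)), Dom_solution land → Pre_solution land → Spec_solution land (solution land)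

-- ===== LEMMAS AND PROOFS =====

-- ===== proof-layer definitions =====
def pvRN (land : List (List Int)) : Nat := land.length
def pvCN (land : List (List Int)) : Nat := (PySem.List.pyGetD land 0 []).length

abbrev pvGood (land : List (List Int)) (p : Int × Int) : Prop :=
  0 ≤ p.1 ∧ p.1 < (pvRN land : Int) ∧ 0 ≤ p.2 ∧ p.2 < (pvCN land : Int) ∧ pvCell land p.1 p.2 ≠ 0

def pvEdge (land : List (List Int)) (p q : Int × Int) : Prop :=
  pvGood land p ∧ pvGood land q ∧ (p.1 - q.1).natAbs + (p.2 - q.2).natAbs = 1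

def pvReach (land : List (List Int)) (s p : Int × Int) : Prop :=
  Relation.ReflTransGen (pvEdge land) s p

def pvMShape (land : List (List Int)) (v : List (List Bool)) : Prop :=
  v.length = pvRN land ∧ ∀ r ∈ v, r.length = pvCN land

def pvFC (v : List (List Bool)) : Nat := (v.map (fun r => r.countP (fun b => b = false))).sum

-- ===== matrix lemmas =====
lemma pvRowMem {α : Type} [Inhabited α] (v : List α) (n : Nat) (h : n < v.length) :
    v.getD n default ∈ v := by
  rw [List.getD_eq_getElem?_getD, List.getElem?_eq_getElem h]
  exact List.getElem_mem h

lemma pvVGet_nonneg (v : List (List Bool)) {i j : Int} (hi : 0 ≤ i) (hj : 0 ≤ j) :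
    pvVGet v i j = (v.getD i.toNat []).getD j.toNat false := by
  simp [pvVGet, PySem.List.pyGet?_of_nonneg _ hi, PySem.List.pyGet?_of_nonneg _ hj,
    List.getD_eq_getElem?_getD]

lemma pvVSet_nonneg (v : List (List Bool)) {i j : Int} (hi : 0 ≤ i) (hj : 0 ≤ j) :
    pvVSet v i j = v.set i.toNat ((v.getD i.toNat []).set j.toNat true) := by
  simp [pvVSet, PySem.List.pySetD_of_nonneg _ _ hi, PySem.List.pySetD_of_nonneg _ _ hj,
    PySem.List.pyGetD_of_nonneg _ _ hi]

lemma pvMShape_set (land : List (List Int)) (v : List (List Bool)) {i j : Int}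
    (hs : pvMShape land v) (hi : 0 ≤ i) (hi2 : i < (pvRN land : Int)) (hj : 0 ≤ j) :
    pvMShape land (pvVSet v i j) := by
  rw [pvVSet_nonneg v hi hj]
  obtain ⟨h1, h2⟩ := hs
  refine ⟨by simpa using h1, ?_⟩
  intro r hr
  rcases List.mem_or_eq_of_mem_set hr with h | h
  · exact h2 r h
  · subst h
    rw [List.length_set]
    exact h2 _ (pvRowMem v i.toNat (by omega))

lemma pvVGet_set (land : List (List Int)) (v : List (List Bool)) {i j : Int}
    (hs : pvMShape land v) (hi : 0 ≤ i) (hi2 : i < (pvRN land : Int)) (hj : 0 ≤ j)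
    (hj2 : j < (pvCN land : Int)) (a b : Int) (ha : 0 ≤ a) (hb : 0 ≤ b) :
    pvVGet (pvVSet v i j) a b = if a = i ∧ b = j then true else pvVGet v a b := by
  rw [pvVSet_nonneg v hi hj, pvVGet_nonneg _ ha hb, pvVGet_nonneg v ha hb]
  have hv1 : v.length = pvRN land := hs.1
  have hilt : i.toNat < v.length := by omega
  have hrowlen : (v.getD i.toNat []).length = pvCN land :=
    hs.2 _ (pvRowMem v i.toNat hilt)
  by_cases hai : a.toNat = i.toNat
  · have hrow : (v.set i.toNat ((v.getD i.toNat []).set j.toNat true)).getD a.toNat [] =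
        (v.getD i.toNat []).set j.toNat true := by
      rw [hai]
      simp [List.getD_eq_getElem?_getD, hilt]
    rw [hrow]
    by_cases hbj : b.toNat = j.toNat
    · have heq : a = i ∧ b = j := by omega
      simp only [heq, and_self, if_true]
      rw [List.getD_eq_getElem?_getD, List.getElem?_set_self (by omega)]
      rfl
    · have hne : ¬(a = i ∧ b = j) := by omega
      simp only [hne, if_false, List.getD_eq_getElem?_getD]
      rw [List.getElem?_set_ne (by omega : j.toNat ≠ b.toNat), hai]
  · have hne : ¬(a = i ∧ b = j) := by omega
    simp only [hne, if_false, List.getD_eq_getElem?_getD]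
    rw [List.getElem?_set_ne (by omega : i.toNat ≠ a.toNat)]

-- ===== falseCount lemmas =====
lemma pvFC_set (land : List (List Int)) (v : List (List Bool)) {i j : Int}
    (hs : pvMShape land v) (hi : 0 ≤ i) (hi2 : i < (pvRN land : Int)) (hj : 0 ≤ j)
    (hj2 : j < (pvCN land : Int)) (hf : pvVGet v i j = false) :
    pvFC (pvVSet v i j) + 1 = pvFC v := by
  rw [pvVSet_nonneg v hi hj]
  have hv1 : v.length = pvRN land := hs.1
  have hilt : i.toNat < v.length := by omega
  set row := v.getD i.toNat [] with hrowdef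
  have hrowlen : row.length = pvCN land := hs.2 _ (pvRowMem v i.toNat hilt)
  have hjlt : j.toNat < row.length := by omega
  have hrowget : row[j.toNat] = false := by
    rw [pvVGet_nonneg v hi hj] at hf
    rw [List.getD_eq_getElem?_getD, List.getElem?_eq_getElem hjlt] at hf
    exact hf
  have hrowelem : row = v[i.toNat] := by
    rw [hrowdef, List.getD_eq_getElem?_getD, List.getElem?_eq_getElem hilt]; rfl
  have hrow_count : (row.set j.toNat true).countP (fun b => b = false) + 1 =
      row.countP (fun b => b = false) := by
    conv_rhs => rw [← List.take_append_drop j.toNat row]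
    rw [List.set_eq_take_append_cons_drop, if_pos hjlt]
    conv_rhs => rw [← List.getElem_cons_drop hjlt]
    simp [List.countP_append, hrowget]
    omega
  have hveq : v = v.take i.toNat ++ row :: v.drop (i.toNat + 1) := by
    conv_lhs => rw [← List.take_append_drop i.toNat v, ← List.getElem_cons_drop hilt]
    rw [hrowelem]
  rw [List.set_eq_take_append_cons_drop, if_pos hilt]
  conv_rhs => rw [hveq]
  simp only [pvFC, List.map_append, List.map_cons, List.sum_append, List.sum_cons]
  omega

lemma pvFC_le (land : List (List Int)) (v : List (List Bool)) (hs : pvMShape land v) :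
    pvFC v ≤ pvRN land * pvCN land := by
  have hb : ∀ x ∈ v.map (fun r => r.countP (fun b => b = false)), x ≤ pvCN land := by
    intro x hx
    simp only [List.mem_map] at hx
    obtain ⟨r, hr, rfl⟩ := hx
    calc r.countP (fun b => b = false) ≤ r.length := List.countP_le_length
    _ = pvCN land := hs.2 r hr
  have h := List.sum_le_card_nsmul _ _ hb
  simpa [pvFC, hs.1, mul_comm] using h

-- ===== graph lemmas =====
lemma pvDirs_target_mem (y x : Int) (r : Int × Int) :
    r ∈ pvDirs.map (fun d => (y + d.1, x + d.2)) ↔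
      (y - r.1).natAbs + (x - r.2).natAbs = 1 := by
  obtain ⟨r1, r2⟩ := r
  simp [pvDirs, Prod.ext_iff]
  omega

lemma pvDirs_target_nodup (y x : Int) :
    (pvDirs.map (fun d => (y + d.1, x + d.2))).Nodup := by
  simp [pvDirs, Prod.ext_iff]

lemma pvNbrs_mem (land : List (List Int)) (p r : Int × Int) :
    r ∈ pvNbrs land (pvRN land : Int) (pvCN land : Int) p ↔
      (pvGood land r ∧ (p.1 - r.1).natAbs + (p.2 - r.2).natAbs = 1) := by
  have key : r ∈ pvNbrs land (pvRN land : Int) (pvCN land : Int) p ↔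
      (r ∈ pvDirs.map (fun d => (p.1 + d.1, p.2 + d.2)) ∧ 0 ≤ r.1 ∧ r.1 < (pvRN land : Int) ∧
        0 ≤ r.2 ∧ r.2 < (pvCN land : Int) ∧ pvCell land r.1 r.2 ≠ 0) := by
    simp only [pvNbrs, List.mem_filterMap, List.mem_map]
    constructor
    · rintro ⟨d, hd, hsome⟩
      by_cases hc : 0 ≤ p.1 + d.1 ∧ p.1 + d.1 < (pvRN land : Int) ∧ 0 ≤ p.2 + d.2 ∧
          p.2 + d.2 < (pvCN land : Int) ∧ pvCell land (p.1 + d.1) (p.2 + d.2) ≠ 0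
      · rw [if_pos hc] at hsome
        injection hsome with hsome
        subst hsome
        exact ⟨⟨d, hd, rfl⟩, hc⟩
      · rw [if_neg hc] at hsome
        cases hsome
    · rintro ⟨⟨d, hd, rfl⟩, hc⟩
      exact ⟨d, hd, by rw [if_pos hc]⟩
  rw [key, pvDirs_target_mem]
  unfold pvGood
  tauto

lemma pvEdge_symm (land : List (List Int)) {p q : Int × Int} (h : pvEdge land p q) :
    pvEdge land q p := ⟨h.2.1, h.1, by have := h.2.2; omega⟩

lemma pvReach_good (land : List (List Int)) {s p : Int × Int} (h : pvReach land s p)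
    (hs : pvGood land s) : pvGood land p := by
  induction h with
  | refl => exact hs
  | tail _ h2 _ => exact h2.2.1

lemma pvReach_symm (land : List (List Int)) {s p : Int × Int} (h : pvReach land s p) :
    pvReach land p s :=
  (Relation.ReflTransGen.symmetric (fun _ _ hh => pvEdge_symm land hh)) h

lemma pvClosed_reach (land : List (List Int)) {D : Int × Int → Prop}
    (hD : ∀ p q, D p → pvEdge land p q → D q) {s p : Int × Int} (hs : D s)
    (h : pvReach land s p) : D p := by
  induction h with
  | refl => exact hs
  | tail _ h2 ih => exact hD _ _ ih h2

lemma pvReach_notin_closed (land : List (List Int)) {D : Int × Int → Prop}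
    (hD : ∀ p q, D p → pvEdge land p q → D q) {s p : Int × Int} (hs : ¬ D s)
    (h : pvReach land s p) : ¬ D p := fun hp =>
  hs (pvClosed_reach land hD hp (pvReach_symm land h))

-- ===== A direction-fold lemma =====
lemma pvStepA_char (land : List (List Int)) (y x : Int) (q0 : List (Int × Int))
    (v : List (List Bool)) (d : Int × Int) :
    pvStepA land (pvRN land : Int) (pvCN land : Int) y x (q0, v) d =
      if pvGood land (y + d.1, x + d.2) ∧ pvVGet v (y + d.1) (x + d.2) = false
      then (q0 ++ [(y + d.1, x + d.2)], pvVSet v (y + d.1) (x + d.2))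
      else (q0, v) := by
  simp only [pvStepA]
  refine if_congr ?_ rfl rfl
  simp only [pvGood]
  tauto

lemma pvStepA_fold (land : List (List Int)) (y x : Int) :
    ∀ (ds : List (Int × Int)) (q0 : List (Int × Int)) (v : List (List Bool)),
    pvMShape land v →
    (ds.map (fun d => (y + d.1, x + d.2))).Nodup →
    ∃ nw v',
      ds.foldl (pvStepA land (pvRN land : Int) (pvCN land : Int) y x) (q0, v) = (q0 ++ nw, v') ∧
      pvMShape land v' ∧ nw.Nodup ∧
      (∀ r, r ∈ nw ↔ r ∈ ds.map (fun d => (y + d.1, x + d.2)) ∧ pvGood land r ∧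
        pvVGet v r.1 r.2 = false) ∧
      (∀ a b : Int, 0 ≤ a → 0 ≤ b →
        (pvVGet v' a b = true ↔ pvVGet v a b = true ∨ (a, b) ∈ nw)) ∧
      pvFC v' + nw.length = pvFC v := by
  intro ds
  induction ds with
  | nil =>
    intro q0 v hs _
    exact ⟨[], v, by simp, hs, by simp, by simp, by simp, by simp⟩
  | cons d ds ih =>
    intro q0 v hs hnd
    rw [List.map_cons, List.nodup_cons] at hnd
    obtain ⟨hdt, hnd'⟩ := hnd
    rw [List.foldl_cons, pvStepA_char]
    by_cases hc : pvGood land (y + d.1, x + d.2) ∧ pvVGet v (y + d.1) (x + d.2) = false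
    · rw [if_pos hc]
      obtain ⟨hgt, hvf⟩ := hc
      obtain ⟨g1, g2, g3, g4, g5⟩ := hgt
      simp only at g1 g2 g3 g4 g5
      have hs1 : pvMShape land (pvVSet v (y + d.1) (x + d.2)) :=
        pvMShape_set land v hs g1 g2 g3
      obtain ⟨nw', v', heq, hs', hnd'', hmem, hcorr, hfc⟩ :=
        ih (q0 ++ [(y + d.1, x + d.2)]) (pvVSet v (y + d.1) (x + d.2)) hs1 hnd'
      have hset := pvVGet_set land v hs g1 g2 g3 g4
      refine ⟨(y + d.1, x + d.2) :: nw', v', by simpa using heq, hs', ?_, ?_, ?_, ?_⟩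
      · rw [List.nodup_cons]
        refine ⟨fun hin => hdt ?_, hnd''⟩
        exact ((hmem _).1 hin).1
      · intro r
        rw [List.mem_cons, hmem r, List.map_cons, List.mem_cons]
        constructor
        · rintro (rfl | ⟨hrt, hg, hvf'⟩)
          · exact ⟨Or.inl rfl, ⟨g1, g2, g3, g4, g5⟩, hvf⟩
          · refine ⟨Or.inr hrt, hg, ?_⟩
            have := hset r.1 r.2 hg.1 hg.2.2.1
            rw [this] at hvf'
            by_cases hre : r.1 = y + d.1 ∧ r.2 = x + d.2
            · rw [if_pos hre] at hvf'; cases hvf'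
            · rwa [if_neg hre] at hvf'
        · rintro ⟨hrt | hrt, hg, hvf'⟩
          · exact Or.inl hrt
          · right
            refine ⟨hrt, hg, ?_⟩
            rw [hset r.1 r.2 hg.1 hg.2.2.1]
            have hne : ¬(r.1 = y + d.1 ∧ r.2 = x + d.2) := by
              intro hh
              apply hdt
              have : r = (y + d.1, x + d.2) := Prod.ext hh.1 hh.2
              rwa [this] at hrt
            rw [if_neg hne]
            exact hvf'
      · intro a b ha hb
        rw [hcorr a b ha hb, hset a b ha hb, List.mem_cons, Prod.ext_iff]
        by_cases hab : a = y + d.1 ∧ b = x + d.2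
        · rw [if_pos hab]; simp [hab]
        · rw [if_neg hab]; simp [hab]
      · have h2 := pvFC_set land v hs g1 g2 g3 g4 hvf
        simp only [List.length_cons]
        omega
    · rw [if_neg hc]
      obtain ⟨nw', v', heq, hs', hnd'', hmem, hcorr, hfc⟩ := ih q0 v hs hnd'
      refine ⟨nw', v', heq, hs', hnd'', ?_, hcorr, hfc⟩
      intro r
      rw [hmem r, List.map_cons, List.mem_cons]
      constructor
      · rintro ⟨hrt, hg, hvf'⟩
        exact ⟨Or.inr hrt, hg, hvf'⟩
      · rintro ⟨hrt | hrt, hg, hvf'⟩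
        · exfalso
          apply hc
          subst hrt
          exact ⟨hg, hvf'⟩
        · exact ⟨hrt, hg, hvf'⟩

-- ===== BFS correctness =====
lemma pvBfs_spec (land : List (List Int)) (s : Int × Int) (V0 : Int × Int → Prop)
    (hV0 : ∀ p, V0 p → ¬ pvReach land s p) :
    ∀ (fuel : Nat) (q P : List (Int × Int)) (v : List (List Bool)) (cnt mn mx : Int),
    pvMShape land v →
    (∀ p : Int × Int, 0 ≤ p.1 → 0 ≤ p.2 → (pvVGet v p.1 p.2 = true ↔ V0 p ∨ p ∈ P ∨ p ∈ q)) →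
    (P ++ q).Nodup →
    (∀ p ∈ P ++ q, pvGood land p ∧ pvReach land s p) →
    (∀ p ∈ P, ∀ r, pvEdge land p r → pvVGet v r.1 r.2 = true) →
    s ∈ P ++ q →
    cnt = (P.length : Int) →
    mn = (P.map Prod.snd).foldl min s.2 →
    mx = (P.map Prod.snd).foldl max s.2 →
    2 * pvFC v + q.length < fuel →
    ∃ (v' : List (List Bool)) (P' : List (Int × Int)),
      pvBfs land (pvRN land : Int) (pvCN land : Int) fuel q v cnt mn mx =
        (v', (P'.length : Int), (P'.map Prod.snd).foldl min s.2,
          (P'.map Prod.snd).foldl max s.2) ∧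
      pvMShape land v' ∧ P'.Nodup ∧
      (∀ p, p ∈ P' ↔ pvReach land s p) ∧
      (∀ p : Int × Int, 0 ≤ p.1 → 0 ≤ p.2 → (pvVGet v' p.1 p.2 = true ↔ V0 p ∨ p ∈ P')) := by
  have base : ∀ (fuel : Nat) (P : List (Int × Int)) (v : List (List Bool)) (cnt mn mx : Int),
      pvMShape land v →
      (∀ p : Int × Int, 0 ≤ p.1 → 0 ≤ p.2 → (pvVGet v p.1 p.2 = true ↔ V0 p ∨ p ∈ P ∨ p ∈ ([] : List (Int × Int)))) →
      (P ++ ([] : List (Int × Int))).Nodup →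
      (∀ p ∈ P ++ ([] : List (Int × Int)), pvGood land p ∧ pvReach land s p) →
      (∀ p ∈ P, ∀ r, pvEdge land p r → pvVGet v r.1 r.2 = true) →
      s ∈ P ++ ([] : List (Int × Int)) →
      cnt = (P.length : Int) →
      mn = (P.map Prod.snd).foldl min s.2 →
      mx = (P.map Prod.snd).foldl max s.2 →
      ∃ (v' : List (List Bool)) (P' : List (Int × Int)),
        pvBfs land (pvRN land : Int) (pvCN land : Int) fuel [] v cnt mn mx =
          (v', (P'.length : Int), (P'.map Prod.snd).foldl min s.2,
            (P'.map Prod.snd).foldl max s.2) ∧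
        pvMShape land v' ∧ P'.Nodup ∧
        (∀ p, p ∈ P' ↔ pvReach land s p) ∧
        (∀ p : Int × Int, 0 ≤ p.1 → 0 ≤ p.2 → (pvVGet v' p.1 p.2 = true ↔ V0 p ∨ p ∈ P')) := by
    intro fuel P v cnt mn mx hs hcorr hnd hPQ hcl hsin hcnt hmn hmx
    simp only [List.append_nil] at hnd hPQ hsin
    have hmemP : ∀ p, p ∈ P ↔ pvReach land s p := by
      intro p
      constructor
      · intro hp; exact (hPQ p hp).2
      · intro hr
        refine pvClosed_reach land (D := fun t => t ∈ P) ?_ hsin hr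
        intro a r ha he
        have hgr := he.2.1
        have := hcl a ha r he
        rw [hcorr r hgr.1 hgr.2.2.1] at this
        rcases this with h0 | hP | h0
        · exfalso
          exact hV0 r h0 ((hPQ a ha).2.tail he)
        · exact hP
        · cases h0
      
    refine ⟨v, P, ?_, hs, hnd, hmemP, ?_⟩
    · cases fuel <;> simp [pvBfs, hcnt, hmn, hmx]
    · intro p h1 h2
      rw [hcorr p h1 h2]
      simp
  intro fuel
  induction fuel with
  | zero =>
    intro q P v cnt mn mx hs hcorr hnd hPQ hcl hsin hcnt hmn hmx hfuel
    cases q with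
    | nil => exact base 0 P v cnt mn mx hs hcorr hnd hPQ hcl hsin hcnt hmn hmx
    | cons hd tl => omega
  | succ fuel ih =>
    intro q P v cnt mn mx hs hcorr hnd hPQ hcl hsin hcnt hmn hmx hfuel
    cases q with
    | nil => exact base (fuel + 1) P v cnt mn mx hs hcorr hnd hPQ hcl hsin hcnt hmn hmx
    | cons hd tl =>
      obtain ⟨y, x⟩ := hd
      obtain ⟨nw, v1, heq, hs1, hnwnd, hmem, hcorr1, hfc⟩ :=
        pvStepA_fold land y x pvDirs tl v hs (pvDirs_target_nodup y x)
      have hyxin : (y, x) ∈ P ++ (y, x) :: tl := by simp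
      have hyxg := (hPQ _ hyxin).1
      have hyxr := (hPQ _ hyxin).2
      -- new-element facts
      have hnwfact : ∀ r ∈ nw, pvGood land r ∧ pvEdge land (y, x) r ∧
          pvVGet v r.1 r.2 = false := by
        intro r hr
        obtain ⟨htar, hg, hvf⟩ := (hmem r).1 hr
        have hdist := (pvDirs_target_mem y x r).1 htar
        exact ⟨hg, ⟨hyxg, hg, hdist⟩, hvf⟩
      -- hypotheses for the recursive call
      have Hcorr : ∀ p : Int × Int, 0 ≤ p.1 → 0 ≤ p.2 →
          (pvVGet v1 p.1 p.2 = true ↔ V0 p ∨ p ∈ P ++ [(y, x)] ∨ p ∈ tl ++ nw) := by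
        intro p h1 h2
        rw [hcorr1 p.1 p.2 h1 h2, hcorr p h1 h2]
        simp only [List.mem_append, List.mem_cons]
        tauto
      have Hnd : ((P ++ [(y, x)]) ++ (tl ++ nw)).Nodup := by
        have hre : (P ++ [(y, x)]) ++ (tl ++ nw) = (P ++ (y, x) :: tl) ++ nw := by
          simp
        rw [hre, List.nodup_append]
        refine ⟨hnd, hnwnd, ?_⟩
        intro a ha b hb
        rintro rfl
        obtain ⟨hg, _, hvf⟩ := hnwfact a hb
        have := (hcorr a hg.1 hg.2.2.1).2 (by
          rcases List.mem_append.1 ha with h | h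
          · exact Or.inr (Or.inl h)
          · exact Or.inr (Or.inr h))
        rw [this] at hvf
        cases hvf
      have HPQ : ∀ p ∈ (P ++ [(y, x)]) ++ (tl ++ nw), pvGood land p ∧ pvReach land s p := by
        intro p hp
        have : p ∈ P ++ (y, x) :: tl ∨ p ∈ nw := by
          simp only [List.mem_append, List.mem_cons] at hp ⊢
          tauto
        rcases this with h | h
        · exact hPQ p h
        · obtain ⟨hg, he, _⟩ := hnwfact p h
          exact ⟨hg, hyxr.tail he⟩
      have Hcl : ∀ p ∈ P ++ [(y, x)], ∀ r, pvEdge land p r → pvVGet v1 r.1 r.2 = true := by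
        intro p hp r he
        have hgr := he.2.1
        rcases List.mem_append.1 hp with h | h
        · have := hcl p h r he
          rw [hcorr r hgr.1 hgr.2.2.1] at this
          rw [hcorr1 r.1 r.2 hgr.1 hgr.2.2.1, hcorr r hgr.1 hgr.2.2.1]
          exact Or.inl this
        · rw [List.mem_singleton] at h
          subst h
          rw [hcorr1 r.1 r.2 hgr.1 hgr.2.2.1]
          by_cases hvr : pvVGet v r.1 r.2 = true
          · rw [hcorr r hgr.1 hgr.2.2.1] at hvr
            rw [hcorr r hgr.1 hgr.2.2.1]
            exact Or.inl hvr
          · right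
            rw [hmem r]
            refine ⟨?_, hgr, by simpa using hvr⟩
            rw [pvDirs_target_mem y x r]
            exact he.2.2
      have Hsin : s ∈ (P ++ [(y, x)]) ++ (tl ++ nw) := by
        simp only [List.mem_append, List.mem_cons] at hsin ⊢
        tauto
      have Hcnt : cnt + 1 = ((P ++ [(y, x)]).length : Int) := by
        have hl : (P ++ [(y, x)]).length = P.length + 1 := by simp
        rw [hcnt, hl]
        push_cast
        ring
      have Hmn : min mn x = ((P ++ [(y, x)]).map Prod.snd).foldl min s.2 := by
        rw [hmn]
        simp [List.foldl_append]
      have Hmx : max mx x = ((P ++ [(y, x)]).map Prod.snd).foldl max s.2 := by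
        rw [hmx]
        simp [List.foldl_append]
      have Hfuel : 2 * pvFC v1 + (tl ++ nw).length < fuel := by
        simp only [List.length_append, List.length_cons] at hfuel ⊢
        omega
      obtain ⟨v', P', hres, hs', hnd', hmemP', hcorr'⟩ :=
        ih (tl ++ nw) (P ++ [(y, x)]) v1 (cnt + 1) (min mn x) (max mx x) hs1
          Hcorr Hnd HPQ Hcl Hsin Hcnt Hmn Hmx Hfuel
      refine ⟨v', P', ?_, hs', hnd', hmemP', hcorr'⟩
      simpa only [pvBfs, heq] using hres

-- ===== cardinality bound =====
lemma pvNodupGood_len (land : List (List Int)) (l : List (Int × Int)) (hnd : l.Nodup)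
    (hg : ∀ p ∈ l, pvGood land p) : l.length ≤ pvRN land * pvCN land := by
  classical
  set f : Int × Int → Nat := fun p => p.1.toNat * pvCN land + p.2.toNat with hf
  have hinj : ∀ p ∈ l, ∀ q ∈ l, f p = f q → p = q := by
    intro p hp q hq hfe
    obtain ⟨a1, a2, a3, a4, _⟩ := hg p hp
    obtain ⟨b1, b2, b3, b4, _⟩ := hg q hq
    simp only [hf] at hfe
    have hC : p.2.toNat < pvCN land := by omega
    have hC' : q.2.toNat < pvCN land := by omega
    have h1 : p.1.toNat = q.1.toNat ∧ p.2.toNat = q.2.toNat := by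
      constructor
      · by_contra hne
        rcases Nat.lt_or_ge p.1.toNat q.1.toNat with h | h
        · have : p.1.toNat * pvCN land + pvCN land ≤ q.1.toNat * pvCN land := by
            have := Nat.succ_le_of_lt h
            calc p.1.toNat * pvCN land + pvCN land = (p.1.toNat + 1) * pvCN land := by ring
            _ ≤ q.1.toNat * pvCN land := Nat.mul_le_mul_right _ this
          omega
        · rcases Nat.lt_or_ge q.1.toNat p.1.toNat with h2 | h2
          · have : q.1.toNat * pvCN land + pvCN land ≤ p.1.toNat * pvCN land := by
              have := Nat.succ_le_of_lt h2
              calc q.1.toNat * pvCN land + pvCN land = (q.1.toNat + 1) * pvCN land := by ring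
              _ ≤ p.1.toNat * pvCN land := Nat.mul_le_mul_right _ this
            omega
          · omega
      · have : p.1.toNat = q.1.toNat := by
          by_contra hne
          rcases Nat.lt_or_ge p.1.toNat q.1.toNat with h | h
          · have : p.1.toNat * pvCN land + pvCN land ≤ q.1.toNat * pvCN land := by
              have := Nat.succ_le_of_lt h
              calc p.1.toNat * pvCN land + pvCN land = (p.1.toNat + 1) * pvCN land := by ring
              _ ≤ q.1.toNat * pvCN land := Nat.mul_le_mul_right _ this
            omega
          · rcases Nat.lt_or_ge q.1.toNat p.1.toNat with h2 | h2
            · have : q.1.toNat * pvCN land + pvCN land ≤ p.1.toNat * pvCN land := by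
                have := Nat.succ_le_of_lt h2
                calc q.1.toNat * pvCN land + pvCN land = (q.1.toNat + 1) * pvCN land := by ring
                _ ≤ p.1.toNat * pvCN land := Nat.mul_le_mul_right _ this
              omega
            · omega
        rw [this] at hfe
        omega
    have : p.1 = q.1 ∧ p.2 = q.2 := by omega
    exact Prod.ext this.1 this.2
  have hnd2 : (l.map f).Nodup := hnd.map_on hinj
  have hsub : (l.map f).toFinset ⊆ Finset.range (pvRN land * pvCN land) := by
    intro n hn
    rw [List.mem_toFinset, List.mem_map] at hn
    obtain ⟨p, hp, rfl⟩ := hn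
    rw [Finset.mem_range]
    obtain ⟨a1, a2, a3, a4, _⟩ := hg p hp
    have h1 : p.1.toNat + 1 ≤ pvRN land := by omega
    calc f p < (p.1.toNat + 1) * pvCN land := by
          simp only [hf, Nat.succ_mul]
          omega
    _ ≤ pvRN land * pvCN land := Nat.mul_le_mul_right _ h1
  have := Finset.card_le_card hsub
  rw [List.toFinset_card_of_nodup hnd2, List.length_map] at this
  simpa using this

-- ===== saturation correctness =====
lemma pvGrow_shape (land : List (List Int)) (comp : PySem.Set (Int × Int))
    (hnd : comp.Nodup) :
    ∃ ex, pvGrow land (pvRN land : Int) (pvCN land : Int) comp = comp ++ ex ∧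
      (comp ++ ex).Nodup ∧
      (∀ r ∈ ex, r ∈ comp.flatMap (pvNbrs land (pvRN land : Int) (pvCN land : Int))) ∧
      (∀ r, r ∈ comp.flatMap (pvNbrs land (pvRN land : Int) (pvCN land : Int)) →
        r ∈ comp ++ ex) := by
  refine ⟨(PySem.Set.ofList (comp.flatMap (pvNbrs land (pvRN land : Int) (pvCN land : Int)))).filter
      (fun y => !(PySem.Set.contains comp y)), ?_, ?_, ?_, ?_⟩
  · rw [pvGrow, PySem.Set.union, PySem.Set.update_eq_append_filter, PySem.Set.ofList_ofList]
  · rw [← PySem.Set.update_eq_append_filter]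
    exact PySem.Set.nodup_update _ _ hnd
  · intro r hr
    rw [List.mem_filter] at hr
    exact (PySem.Set.mem_ofList _ _).1 hr.1
  · intro r hr
    rw [List.mem_append]
    by_cases hc : r ∈ comp
    · exact Or.inl hc
    · right
      rw [List.mem_filter]
      refine ⟨(PySem.Set.mem_ofList _ _).2 hr, ?_⟩
      simp [hc]

lemma pvSaturate_spec (land : List (List Int)) (s : Int × Int) (hgs : pvGood land s) :
    ∀ (fuel : Nat) (comp : PySem.Set (Int × Int)), comp.Nodup → s ∈ comp →
    (∀ p ∈ comp, pvReach land s p) →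
    pvRN land * pvCN land < comp.length + fuel →
    ∃ comp', pvSaturate land (pvRN land : Int) (pvCN land : Int) fuel comp = comp' ∧
      comp'.Nodup ∧ (∀ p, p ∈ comp' ↔ pvReach land s p) := by
  intro fuel
  induction fuel with
  | zero =>
    intro comp hnd hsin hreach hbound
    exfalso
    have := pvNodupGood_len land comp hnd (fun p hp => pvReach_good land (hreach p hp) hgs)
    omega
  | succ fuel ih =>
    intro comp hnd hsin hreach hbound
    obtain ⟨ex, hgrow, hndg, hexsub, hflat⟩ := pvGrow_shape land comp hnd
    by_cases hlen : PySem.Set.len (pvGrow land (pvRN land : Int) (pvCN land : Int) comp) =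
        PySem.Set.len comp
    · -- fixpoint
      have hex : ex = [] := by
        rw [hgrow] at hlen
        simp only [PySem.Set.len] at hlen
        rw [List.length_append] at hlen
        have : ex.length = 0 := by omega
        exact List.length_eq_zero_iff.1 this
      subst hex
      have hclosed : ∀ p q, p ∈ comp → pvEdge land p q → q ∈ comp := by
        intro p q hp he
        have hq : q ∈ comp.flatMap (pvNbrs land (pvRN land : Int) (pvCN land : Int)) := by
          rw [List.mem_flatMap]
          exact ⟨p, hp, (pvNbrs_mem land p q).2 ⟨he.2.1, he.2.2⟩⟩
        simpa using hflat q hq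
      refine ⟨comp, ?_, hnd, ?_⟩
      · simp only [pvSaturate]
        rw [if_pos hlen]
      · intro p
        constructor
        · exact hreach p
        · exact fun hr => pvClosed_reach land (D := fun t => t ∈ comp)
            (fun a b ha hb => hclosed a b ha hb) hsin hr
    · -- grow
      have hexne : ex ≠ [] := by
        intro hex
        apply hlen
        rw [hgrow, hex]
        simp
      have hlen1 : comp.length + 1 ≤ (comp ++ ex).length := by
        rw [List.length_append]
        have : 0 < ex.length := List.length_pos_iff.2 hexne
        omega
      have hreach' : ∀ p ∈ comp ++ ex, pvReach land s p := by
        intro p hp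
        rcases List.mem_append.1 hp with h | h
        · exact hreach p h
        · have := hexsub p h
          rw [List.mem_flatMap] at this
          obtain ⟨a, ha, hnb⟩ := this
          obtain ⟨hgp, hdist⟩ := (pvNbrs_mem land a p).1 hnb
          exact (hreach a ha).tail ⟨pvReach_good land (hreach a ha) hgs, hgp, hdist⟩
      obtain ⟨comp', hsat, hnd', hmem'⟩ := ih (comp ++ ex) hndg (by simp [hsin]) hreach'
        (by omega)
      refine ⟨comp', ?_, hnd', hmem'⟩
      simp only [pvSaturate]
      rw [if_neg hlen, hgrow]
      exact hsat

-- ===== extremum equality helpers =====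
lemma pvMin_eq (l1 l2 : List Int) (a : Int) (ha : a ∈ l2)
    (hmem : ∀ z, z ∈ l1 ↔ z ∈ l2) :
    l1.foldl min a = (PySem.List.min? l2 (fun z => z)).getD 0 := by
  cases hmq : PySem.List.min? l2 (fun z => z) with
  | none =>
    rw [PySem.List.min?_eq_none_iff] at hmq
    subst hmq
    cases ha
  | some m =>
    have hmmem := PySem.List.min?_mem hmq
    have hmmin := PySem.List.min?_isMin hmq
    have h1 := PySem.List.foldl_min_le l1 a
    have hr2 : l1.foldl min a ∈ l2 := by
      rcases PySem.List.foldl_min_mem l1 a with h | h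
      · rwa [h]
      · exact (hmem _).1 h
    have hle1 : l1.foldl min a ≤ m := by
      rcases (hmem m).2 hmmem |> fun hm1 => h1.2 m hm1 with h
      exact h
    have hle2 : m ≤ l1.foldl min a := hmmin _ hr2
    simp only [Option.getD_some]
    omega

lemma pvMax_eq (l1 l2 : List Int) (a : Int) (ha : a ∈ l2)
    (hmem : ∀ z, z ∈ l1 ↔ z ∈ l2) :
    l1.foldl max a = (PySem.List.max? l2 (fun z => z)).getD 0 := by
  cases hmq : PySem.List.max? l2 (fun z => z) with
  | none =>
    rw [PySem.List.max?_eq_none_iff] at hmq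
    subst hmq
    cases ha
  | some m =>
    have hmmem := PySem.List.max?_mem hmq
    have hmmax := PySem.List.max?_isMax hmq
    have h1 := PySem.List.le_foldl_max l1 a
    have hr2 : l1.foldl max a ∈ l2 := by
      rcases PySem.List.foldl_max_mem l1 a with h | h
      · rwa [h]
      · exact (hmem _).1 h
    have hle1 : m ≤ l1.foldl max a := h1.2 m ((hmem m).2 hmmem)
    have hle2 : l1.foldl max a ≤ m := hmmax _ hr2
    simp only [Option.getD_some]
    omega

-- A's max(res) over a list ending in 0 equals B's running max starting from 0
lemma pvMaxZ (l : List Int) :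
    (PySem.List.max? (l ++ [0]) (fun z => z)).getD 0 = l.foldl max 0 := by
  cases hmq : PySem.List.max? (l ++ [0]) (fun z => z) with
  | none =>
    rw [PySem.List.max?_eq_none_iff] at hmq
    cases l <;> simp at hmq
  | some m =>
    have hmmem := PySem.List.max?_mem hmq
    have hmmax := PySem.List.max?_isMax hmq
    have h1 := PySem.List.le_foldl_max l 0
    have hr2 : l.foldl max 0 ∈ l ++ [0] := by
      rcases PySem.List.foldl_max_mem l 0 with h | h
      · rw [h]; simp
      · exact List.mem_append_left _ h
    have hle2 : l.foldl max 0 ≤ m := hmmax _ hr2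
    have hle1 : m ≤ l.foldl max 0 := by
      rcases List.mem_append.1 hmmem with h | h
      · exact h1.2 m h
      · rw [List.mem_singleton] at h
        rw [h]
        exact h1.1
    simp only [Option.getD_some]
    omega

-- ===== res array lemmas =====
def pvResOf (comps : List (Int × Int × Int)) (k : Int) : Int :=
  ((comps.filter (fun t => decide (t.2.1 ≤ k ∧ k ≤ t.2.2))).map (fun t => t.1)).sum

lemma pvResOf_append (comps : List (Int × Int × Int)) (c lo hi k : Int) :
    pvResOf (comps ++ [(c, lo, hi)]) k =
      pvResOf comps k + (if lo ≤ k ∧ k ≤ hi then c else 0) := by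
  by_cases h : lo ≤ k ∧ k ≤ hi <;>
    simp [pvResOf, List.filter_append, h]

lemma pvResUpd (c : Int) :
    ∀ (n : Nat) (a : Int) (res : List Int), 0 ≤ a → a.toNat + n ≤ res.length →
    ((PySem.List.pyRange a (a + n) 1).foldl
        (fun res k => PySem.List.pySetD res k (PySem.List.pyGetD res k 0 + c)) res).length =
      res.length ∧
    ∀ m : Int, 0 ≤ m →
      PySem.List.pyGetD ((PySem.List.pyRange a (a + n) 1).foldl
        (fun res k => PySem.List.pySetD res k (PySem.List.pyGetD res k 0 + c)) res) m 0 =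
      PySem.List.pyGetD res m 0 + (if a ≤ m ∧ m < a + n then c else 0) := by
  intro n
  induction n with
  | zero =>
    intro a res ha hlen
    have hnil : PySem.List.pyRange a (a + (0 : Nat)) 1 = [] := by
      simp
    rw [hnil]
    refine ⟨rfl, ?_⟩
    intro m hm
    simp
  | succ n ih =>
    intro a res ha hlen
    have hcons : PySem.List.pyRange a (a + (n + 1 : Nat)) 1 =
        a :: PySem.List.pyRange (a + 1) (a + (n + 1 : Nat)) 1 := by
      apply PySem.List.pyRange_one_cons
      push_cast
      omega
    have hsh : a + ((n + 1 : Nat) : Int) = (a + 1) + (n : Int) := by push_cast; ring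
    set res1 := PySem.List.pySetD res a (PySem.List.pyGetD res a 0 + c) with hres1
    have hlen1 : res1.length = res.length := PySem.List.length_pySetD res a _
    have hcast : a = ((a.toNat : Nat) : Int) := by omega
    have hgetset : ∀ m : Int, 0 ≤ m →
        PySem.List.pyGetD res1 m 0 =
          if m = a then PySem.List.pyGetD res a 0 + c else PySem.List.pyGetD res m 0 := by
      intro m hm
      have hmcast : m = ((m.toNat : Nat) : Int) := by omega
      rw [hres1, hcast, hmcast]
      rw [PySem.List.pyGetD_pySetD_natCast res a.toNat m.toNat _ 0 (by omega)]
      rw [← hcast, ← hmcast]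
      by_cases hma : m = a
      · rw [if_pos (show m.toNat = a.toNat by omega), if_pos hma]
      · rw [if_neg (show ¬ m.toNat = a.toNat by omega), if_neg hma]
    obtain ⟨ihlen, ihget⟩ := ih (a + 1) res1 (by omega) (by omega)
    rw [hcons, List.foldl_cons, ← hres1]
    constructor
    · rw [← hsh] at ihlen
      rw [ihlen, hlen1]
    · intro m hm
      have h2 := ihget m hm
      rw [← hsh] at h2
      rw [h2, hgetset m hm]
      by_cases hma : m = a
      · subst hma
        rw [if_pos rfl, if_neg (show ¬(m + 1 ≤ m ∧ m < m + ((n + 1 : Nat) : Int)) by omega),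
          if_pos (by push_cast; omega)]
        omega
      · rw [if_neg hma]
        by_cases hin : a + 1 ≤ m ∧ m < a + ((n + 1 : Nat) : Int)
        · rw [if_pos hin, if_pos (by push_cast; omega)]
        · rw [if_neg hin, if_neg (by push_cast; omega)]

-- ===== generic fold coupling =====
lemma pvFoldl2 {α β γ : Type} (l : List γ) (f : α → γ → α) (g : β → γ → β)
    (CP : α → β → Prop) (h : ∀ a b c, c ∈ l → CP a b → CP (f a c) (g b c)) :
    ∀ a0 b0, CP a0 b0 → CP (l.foldl f a0) (l.foldl g b0) := by
  induction l with
  | nil => intro a0 b0 hcp; exact hcp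
  | cons x xs ih =>
    intro a0 b0 hcp
    rw [List.foldl_cons, List.foldl_cons]
    exact ih (fun a b c hc => h a b c (List.mem_cons_of_mem _ hc)) _ _
      (h a0 b0 x (List.mem_cons_self) hcp)

-- ===== coupling invariant =====
def pvCP (land : List (List Int)) (stA : List (List Bool) × List Int)
    (stB : PySem.Set (Int × Int) × List (Int × Int × Int)) : Prop :=
  pvMShape land stA.1 ∧
  stB.1.Nodup ∧
  (∀ p ∈ stB.1, pvGood land p) ∧
  (∀ p ∈ stB.1, ∀ r, pvEdge land p r → r ∈ stB.1) ∧
  (∀ p : Int × Int, 0 ≤ p.1 → 0 ≤ p.2 → (pvVGet stA.1 p.1 p.2 = true ↔ p ∈ stB.1)) ∧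
  stA.2.length = pvCN land + 1 ∧
  (∀ m : Int, 0 ≤ m → m < (pvCN land : Int) + 1 →
    PySem.List.pyGetD stA.2 m 0 = pvResOf stB.2 m) ∧
  (∀ t ∈ stB.2, t.2.2 < (pvCN land : Int))

lemma pvVGet_rep (R C : Nat) (a b : Int) (ha : 0 ≤ a) (hb : 0 ≤ b) :
    pvVGet (List.replicate R (List.replicate C false)) a b = false := by
  rw [pvVGet_nonneg _ ha hb]
  by_cases h1 : a.toNat < R
  · have hrow : (List.replicate R (List.replicate C false)).getD a.toNat [] =
        List.replicate C false := by
      rw [List.getD_eq_getElem?_getD, List.getElem?_replicate, if_pos h1]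
      rfl
    rw [hrow]
    by_cases h2 : b.toNat < C
    · rw [List.getD_eq_getElem?_getD, List.getElem?_replicate, if_pos h2]
      rfl
    · rw [List.getD_eq_getElem?_getD, List.getElem?_replicate, if_neg h2]
      rfl
  · have hrow : (List.replicate R (List.replicate C false)).getD a.toNat [] = [] := by
      rw [List.getD_eq_getElem?_getD, List.getElem?_replicate, if_neg h1]
      rfl
    rw [hrow]
    simp


-- ===== VERDICT (by name: the statement is the Claim_ definition above) =====
set_option maxHeartbeats 2000000 in
theorem solution_spec : Claim_equal_solution := by
  intro land hdom hpre
  unfold Spec_solution solution solution_alt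
  simp only [PySem.List.len_eq]
  rw [show land.length = pvRN land from rfl,
      show (PySem.List.pyGetD land 0 []).length = pvCN land from rfl]
  -- initial coupling state
  have hinit : pvCP land
      (List.replicate (pvRN land) (List.replicate (pvCN land) false),
        List.replicate (pvCN land + 1) 0)
      ((PySem.Set.empty : PySem.Set (Int × Int)), ([] : List (Int × Int × Int))) := by
    refine ⟨⟨by simp, ?_⟩, by simp [PySem.Set.empty], by simp [PySem.Set.empty],
      by simp [PySem.Set.empty], ?_, by simp, ?_, by simp⟩
    · intro r hr
      rw [List.eq_of_mem_replicate hr]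
      simp
    · intro p h1 h2
      rw [pvVGet_rep _ _ _ _ h1 h2]
      simp [PySem.Set.empty]
    · intro m h1 h2
      rw [PySem.List.pyGetD_of_nonneg _ _ h1]
      rw [List.getD_eq_getElem?_getD, List.getElem?_replicate, if_pos (by omega)]
      simp [pvResOf]
  -- per-row step
  have hstep : ∀ (stA : List (List Bool) × List Int)
      (stB : PySem.Set (Int × Int) × List (Int × Int × Int)) (ii : Int),
      ii ∈ PySem.List.pyRange 0 ((pvRN land : Int)) 1 → pvCP land stA stB →
      pvCP land
        (List.foldl
          (fun st j =>
            if pvCell land ii j ≠ 0 ∧ pvVGet st.1 ii j = false then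
              ((pvBfs land (↑(pvRN land)) (↑(pvCN land)) (2 * pvRN land * pvCN land + 2) [(ii, j)]
                    (pvVSet st.1 ii j) 0 j j).1,
                List.foldl
                  (fun res k =>
                    PySem.List.pySetD res k
                      (PySem.List.pyGetD res k 0 +
                        (pvBfs land (↑(pvRN land)) (↑(pvCN land)) (2 * pvRN land * pvCN land + 2)
                              [(ii, j)] (pvVSet st.1 ii j) 0 j j).2.1))
                  st.2
                  (PySem.List.pyRange
                    (pvBfs land (↑(pvRN land)) (↑(pvCN land)) (2 * pvRN land * pvCN land + 2)
                            [(ii, j)] (pvVSet st.1 ii j) 0 j j).2.2.1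
                    ((pvBfs land (↑(pvRN land)) (↑(pvCN land)) (2 * pvRN land * pvCN land + 2)
                              [(ii, j)] (pvVSet st.1 ii j) 0 j j).2.2.2 +
                      1) 1))
            else st)
          stA (PySem.List.pyRange 0 (↑(pvCN land)) 1))
        (List.foldl
          (fun st j =>
            if pvCell land ii j ≠ 0 ∧ ¬PySem.Set.contains st.1 (ii, j) = true then
              (PySem.Set.union st.1
                  (pvSaturate land (↑(pvRN land)) (↑(pvCN land)) (pvRN land * pvCN land + 1)
                    (PySem.Set.ofList [(ii, j)])),
                st.2 ++
                  [(PySem.Set.len (pvSaturate land (↑(pvRN land)) (↑(pvCN land))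
                        (pvRN land * pvCN land + 1) (PySem.Set.ofList [(ii, j)])),
                      (PySem.List.min?
                            (List.map (fun p => p.2)
                              (pvSaturate land (↑(pvRN land)) (↑(pvCN land))
                                (pvRN land * pvCN land + 1) (PySem.Set.ofList [(ii, j)])))
                            fun z => z).getD 0,
                      (PySem.List.max?
                            (List.map (fun p => p.2)
                              (pvSaturate land (↑(pvRN land)) (↑(pvCN land))
                                (pvRN land * pvCN land + 1) (PySem.Set.ofList [(ii, j)])))
                            fun z => z).getD 0)])
            else st)
          stB (PySem.List.pyRange 0 (↑(pvCN land)) 1)) := by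
    intro stA stB ii hii hcp
    rw [PySem.List.mem_pyRange_one] at hii
    obtain ⟨hi0, hiR⟩ := hii
    refine pvFoldl2 _ _ _ (pvCP land) ?_ _ _ hcp
    intro a b jj hjj hcp'
    rw [PySem.List.mem_pyRange_one] at hjj
    obtain ⟨hj0, hjC⟩ := hjj
    obtain ⟨hsh, hndB, hgoodB, hclB, hcorr, hlenR, hresR, hbndR⟩ := hcp'
    by_cases hcell : pvCell land ii jj ≠ 0 ∧ pvVGet a.1 ii jj = false
    · have hnotmem : (ii, jj) ∉ b.1 := by
        intro hmem
        have hvt := (hcorr (ii, jj) hi0 hj0).2 hmem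
        rw [hcell.2] at hvt
        cases hvt
      have hcB : pvCell land ii jj ≠ 0 ∧ ¬PySem.Set.contains b.1 (ii, jj) = true :=
        ⟨hcell.1, fun hct => hnotmem ((PySem.Set.contains_iff _ _).1 hct)⟩
      rw [if_pos hcell, if_pos hcB]
      have hgs : pvGood land (ii, jj) := ⟨hi0, hiR, hj0, hjC, hcell.1⟩
      have hV0 : ∀ p, p ∈ b.1 → ¬pvReach land (ii, jj) p := by
        intro p hp hr
        exact (pvReach_notin_closed land
          (fun x y hx hxy => hclB x hx y hxy) hnotmem hr) hp
      have hs1 : pvMShape land (pvVSet a.1 ii jj) := pvMShape_set land a.1 hsh hi0 hiR hj0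
      have hsetc := pvVGet_set land a.1 hsh hi0 hiR hj0 hjC
      have hcorr1 : ∀ p : Int × Int, 0 ≤ p.1 → 0 ≤ p.2 →
          (pvVGet (pvVSet a.1 ii jj) p.1 p.2 = true ↔
            (p ∈ b.1) ∨ p ∈ ([] : List (Int × Int)) ∨ p ∈ [(ii, jj)]) := by
        intro p h1 h2
        rw [hsetc p.1 p.2 h1 h2]
        by_cases hpe : p.1 = ii ∧ p.2 = jj
        · rw [if_pos hpe]
          simp [Prod.ext_iff, hpe]
        · rw [if_neg hpe, hcorr p h1 h2]
          simp [Prod.ext_iff, hpe]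
      have hfc1 := pvFC_set land a.1 hsh hi0 hiR hj0 hjC hcell.2
      have hfcle := pvFC_le land a.1 hsh
      obtain ⟨v', P', hres, hs', hndP', hmemP', hcorr'⟩ :=
        pvBfs_spec land (ii, jj) (fun p => p ∈ b.1) hV0
          (2 * pvRN land * pvCN land + 2) [(ii, jj)] [] (pvVSet a.1 ii jj) 0 jj jj
          hs1 hcorr1 (by simp)
          (by intro p hp
              simp only [List.nil_append, List.mem_singleton] at hp
              subst hp
              exact ⟨hgs, Relation.ReflTransGen.refl⟩)
          (by intro p hp; simp at hp)
          (by simp)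
          (by simp)
          (by simp)
          (by simp)
          (by simp only [List.length_cons, List.length_nil]
              have hassoc : 2 * pvRN land * pvCN land = 2 * (pvRN land * pvCN land) := by ring
              omega)
      obtain ⟨comp', hsat, hndC, hmemC⟩ :=
        pvSaturate_spec land (ii, jj) hgs (pvRN land * pvCN land + 1) [(ii, jj)]
          (by simp) (by simp)
          (by intro p hp
              simp only [List.mem_singleton] at hp
              subst hp
              exact Relation.ReflTransGen.refl)
          (by simp only [List.length_cons, List.length_nil]; omega)
      have hofl : PySem.Set.ofList [((ii : Int), (jj : Int))] = [(ii, jj)] := by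
        apply PySem.Set.ofList_eq_self_of_nodup
        simp
      rw [hofl, hsat, hres]
      dsimp only
      -- component identification
      have hPP : ∀ p, p ∈ P' ↔ p ∈ comp' := fun p => (hmemP' p).trans (hmemC p).symm
      have hlenPC : P'.length = comp'.length :=
        ((List.perm_ext_iff_of_nodup hndP' hndC).2 hPP).length_eq
      have hsndmem : ∀ z : Int, z ∈ P'.map Prod.snd ↔ z ∈ comp'.map (fun p => p.2) := by
        intro z
        simp only [List.mem_map]
        constructor
        · rintro ⟨p, hp, rfl⟩; exact ⟨p, (hPP p).1 hp, rfl⟩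
        · rintro ⟨p, hp, rfl⟩; exact ⟨p, (hPP p).2 hp, rfl⟩
      have hjin : jj ∈ comp'.map (fun p => p.2) := by
        simp only [List.mem_map]
        exact ⟨(ii, jj), (hmemC _).2 Relation.ReflTransGen.refl, rfl⟩
      have hgoodC : ∀ p ∈ comp', pvGood land p :=
        fun p hp => pvReach_good land ((hmemC p).1 hp) hgs
      have hgoodP : ∀ p ∈ P', pvGood land p := fun p hp => hgoodC p ((hPP p).1 hp)
      set mn := (P'.map Prod.snd).foldl min jj with hmndef
      set mx := (P'.map Prod.snd).foldl max jj with hmxdef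
      have hmn := pvMin_eq (P'.map Prod.snd) (comp'.map (fun p => p.2)) jj hjin hsndmem
      have hmx := pvMax_eq (P'.map Prod.snd) (comp'.map (fun p => p.2)) jj hjin hsndmem
      have hmn0 : 0 ≤ mn := by
        rcases PySem.List.foldl_min_mem (P'.map Prod.snd) jj with h | h
        · omega
        · rw [List.mem_map] at h
          obtain ⟨p, hp, hpe⟩ := h
          have := hgoodP p hp
          omega
      have hmnle : mn ≤ jj := (PySem.List.foldl_min_le _ _).1
      have hmxge : jj ≤ mx := (PySem.List.le_foldl_max _ _).1
      have hmxlt : mx < (pvCN land : Int) := by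
        rcases PySem.List.foldl_max_mem (P'.map Prod.snd) jj with h | h
        · omega
        · rw [List.mem_map] at h
          obtain ⟨p, hp, hpe⟩ := h
          have := hgoodP p hp
          omega
      have hcnteq : ((P'.length : Nat) : Int) = PySem.Set.len comp' := by
        simp [PySem.Set.len, hlenPC]
      have hb1 : mx + 1 = mn + (((mx + 1 - mn).toNat : Nat) : Int) := by omega
      obtain ⟨hL, hG⟩ := pvResUpd ((P'.length : Nat) : Int) (mx + 1 - mn).toNat mn a.2
        hmn0 (by omega)
      rw [← hb1] at hL hG
      refine ⟨hs', PySem.Set.nodup_union _ _ hndB, ?_, ?_, ?_, ?_, ?_, ?_⟩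
      · intro p hp
        rw [PySem.Set.mem_union] at hp
        rcases hp with h | h
        · exact hgoodB p h
        · exact hgoodC p h
      · intro p hp r he
        rw [PySem.Set.mem_union] at hp ⊢
        rcases hp with h | h
        · exact Or.inl (hclB p h r he)
        · exact Or.inr ((hmemC r).2 (((hmemC p).1 h).tail he))
      · intro p h1 h2
        rw [hcorr' p h1 h2, PySem.Set.mem_union]
        constructor
        · rintro (h | h)
          · exact Or.inl h
          · exact Or.inr ((hPP p).1 h)
        · rintro (h | h)
          · exact Or.inl h
          · exact Or.inr ((hPP p).2 h)
      · rw [hL]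
        exact hlenR
      · intro m hm1 hm2
        rw [hG m hm1, hresR m hm1 hm2, pvResOf_append, ← hmn, ← hmx, ← hcnteq]
        have hiff : (mn ≤ m ∧ m < mx + 1) ↔ (mn ≤ m ∧ m ≤ mx) := by omega
        rw [if_congr hiff rfl rfl]
      · intro t ht
        rcases List.mem_append.1 ht with h | h
        · exact hbndR t h
        · rw [List.mem_singleton] at h
          subst h
          simpa [← hmx] using hmxlt
    · have hcB : ¬(pvCell land ii jj ≠ 0 ∧ ¬PySem.Set.contains b.1 (ii, jj) = true) := by
        rintro ⟨h1, h2⟩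
        apply hcell
        refine ⟨h1, ?_⟩
        cases hx : pvVGet a.1 ii jj with
        | false => rfl
        | true =>
          exact absurd ((PySem.Set.contains_iff _ _).2 ((hcorr (ii, jj) hi0 hj0).1 hx)) h2
      rw [if_neg hcell, if_neg hcB]
      exact ⟨hsh, hndB, hgoodB, hclB, hcorr, hlenR, hresR, hbndR⟩
  -- reduce to a statement about the two final states
  suffices h : ∀ (finA : List (List Bool) × List Int)
      (finB : PySem.Set (Int × Int) × List (Int × Int × Int)),
      pvCP land finA finB →
      (PySem.List.max? finA.2 (fun z => z)).getD 0 =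
      (PySem.List.pyRange 0 ((pvCN land : Int)) 1).foldl (fun best k =>
        max best ((List.map (fun t => t.1)
          (List.filter (fun t => decide (t.2.1 ≤ k ∧ k ≤ t.2.2)) finB.2)).sum)) 0 by
    exact h _ _ (pvFoldl2 _ _ _ (pvCP land) hstep _ _ hinit)
  intro finA finB hcp
  obtain ⟨_, _, _, _, _, hlen, hres, hbnd⟩ := hcp
  -- A's res list is exactly the per-column sums over the real columns, plus a trailing 0
  have hlist : finA.2 =
      (List.map (fun n : Nat => pvResOf finB.2 (n : Int)) (List.range (pvCN land))) ++ [(0 : Int)] := by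
    apply List.ext_getElem
    · simp [hlen]
    · intro n hn1 hn2
      have hget : finA.2[n] = PySem.List.pyGetD finA.2 (n : Int) 0 := by
        rw [PySem.List.pyGetD_natCast, List.getD_eq_getElem?_getD,
          List.getElem?_eq_getElem hn1]
        rfl
      rw [hget, hres (n : Int) (by omega) (by rw [hlen] at hn1; push_cast; omega)]
      rw [hlen] at hn1
      by_cases hc : n < pvCN land
      · rw [List.getElem_append_left (by simpa using hc)]
        simp only [List.getElem_map, List.getElem_range]
      · have hn : n = pvCN land := by omega
        subst hn
        have hempty : finB.2.filter (fun t => decide (t.2.1 ≤ ((pvCN land : Nat) : Int) ∧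
            ((pvCN land : Nat) : Int) ≤ t.2.2)) = [] := by
          rw [List.filter_eq_nil_iff]
          intro t ht
          have := hbnd t ht
          simp only [decide_eq_true_eq]
          omega
        have hz : pvResOf finB.2 ((pvCN land : Nat) : Int) = 0 := by
          simp only [pvResOf, hempty, List.map_nil, List.sum_nil]
        rw [hz, List.getElem_append_right (by simp)]
        simp
  rw [hlist, pvMaxZ]
  -- B's fold equals the foldl max over the mapped list
  have hrange : PySem.List.pyRange 0 ((pvCN land : Int)) 1 =
      List.map (fun k : Nat => (k : Int)) (List.range (pvCN land)) := by
    exact PySem.List.pyRange_zero_natCast _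
  rw [hrange, List.foldl_map, List.foldl_map]
  rfl
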